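-- pv_equiv track=rewrite | github.com/karansbir/altitude-summary | src/altitude_parser.py | count_activities_by_type
-- ===== SOURCE A (Python) =====
-- from typing import List, Dict, Any, Optional
--
-- def count_activities_by_type(activities: List[Dict], activity_name: str) -> Dict[str, int]:
--     """Count activities by type (wet, dry, bm)"""
--     filtered = [a for a in activities if a['activity'] == activity_name]
--
--     counts = {'wet': 0, 'dry': 0, 'bm': 0}
--
--     for activity in filtered:
--         activity_type = activity['type'].lower()
--         if 'wet' in activity_type:
--             counts['wet'] += 1
--         if 'dry' in activity_type:
--             counts['dry'] += 1
--         if 'bm' in activity_type: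
--             counts['bm'] += 1
--
--     return counts
-- ===== SOURCE B (Python) =====
-- def count_activities_by_type(activities, activity_name):
--     """Count activities by type (wet, dry, bm)"""
--     # Stage 1: group the name-matched activities by their (lowercased) type
--     # string into a frequency map.
--     freq = {}
--     for a in activities:
--         if a['activity'] == activity_name:
--             t = a['type'].lower()
--             freq[t] = freq.get(t, 0) + 1
--     # Stage 2: each key's count is the total multiplicity of the DISTINCT
--     # type strings containing it (substring tests run once per distinct type).
--     return {k: sum(n for t, n in freq.items() if k in t)
--             for k in ('wet', 'dry', 'bm')}
-- ===== Notes on version B (the rewrite author's own statement) =====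
-- stated objective: alternative
-- what changed: B replaces A's filter-then-increment pass over three fixed counters with a two-stage algorithm: it first hash-groups name-matched activities into a frequency map keyed by lowercased type string, then derives each of the three counts by summing multiplicities over the distinct type strings, so substring tests run once per distinct type instead of once per activity.
import Mathlib
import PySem

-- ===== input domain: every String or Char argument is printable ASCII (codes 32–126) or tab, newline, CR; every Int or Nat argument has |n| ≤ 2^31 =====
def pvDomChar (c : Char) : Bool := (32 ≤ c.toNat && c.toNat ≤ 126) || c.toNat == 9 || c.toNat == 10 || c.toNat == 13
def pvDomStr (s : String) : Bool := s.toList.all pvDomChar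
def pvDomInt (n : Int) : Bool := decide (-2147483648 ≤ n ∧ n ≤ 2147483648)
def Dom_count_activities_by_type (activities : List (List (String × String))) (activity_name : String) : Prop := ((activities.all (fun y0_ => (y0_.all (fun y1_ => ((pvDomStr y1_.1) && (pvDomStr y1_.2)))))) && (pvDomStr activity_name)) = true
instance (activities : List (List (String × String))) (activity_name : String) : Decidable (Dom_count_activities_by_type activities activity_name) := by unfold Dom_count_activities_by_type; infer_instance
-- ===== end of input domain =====

-- B is an alternative algorithm: it hash-groups name-matched activities into a frequency
-- map keyed by lowercased type string, then sums multiplicities over the distinct types,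
-- instead of A's filter pass plus a mutating three-counter loop.

-- ===== PORT A =====
def count_activities_by_type (activities : List (List (String × String))) (activity_name : String) : List (String × Int) :=
  let filtered := activities.filter (fun a => (PySem.Dict.ofList a).get? "activity" == some activity_name)
  let counts : PySem.Dict String Int := PySem.Dict.ofList [("wet", 0), ("dry", 0), ("bm", 0)]
  let counts := filtered.foldl (fun d a =>
    let t := PySem.Str.lower (((PySem.Dict.ofList a).get? "type").getD "")
    let d1 := if PySem.Str.isIn "wet" t then d.insert "wet" (d.getD "wet" 0 + 1) else d
    let d2 := if PySem.Str.isIn "dry" t then d1.insert "dry" (d1.getD "dry" 0 + 1) else d1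
    if PySem.Str.isIn "bm" t then d2.insert "bm" (d2.getD "bm" 0 + 1) else d2) counts
  counts.items

-- ===== PORT B =====
def count_activities_by_type_alt (activities : List (List (String × String))) (activity_name : String) : List (String × Int) :=
  let freq : PySem.Dict String Int := activities.foldl (fun d a =>
    if (PySem.Dict.ofList a).get? "activity" == some activity_name then
      let t := PySem.Str.lower (((PySem.Dict.ofList a).get? "type").getD "")
      d.insert t (d.getD t 0 + 1)
    else d) PySem.Dict.empty
  ["wet", "dry", "bm"].map (fun k =>
    (k, ((freq.items.filter (fun p => PySem.Str.isIn k p.1)).map Prod.snd).sum))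

-- ===== PRECONDITION & SPEC =====
-- Pre_ excludes exactly the inputs where Python A raises KeyError: some activity dict
-- lacks the 'activity' key, or a name-matched activity lacks the 'type' key.
def Pre_count_activities_by_type (activities : List (List (String × String))) (activity_name : String) : Prop :=
  ∀ a ∈ activities, (PySem.Dict.ofList a).contains "activity" = true ∧
    ((PySem.Dict.ofList a).get? "activity" = some activity_name → (PySem.Dict.ofList a).contains "type" = true)
instance (activities : List (List (String × String))) (activity_name : String) : Decidable (Pre_count_activities_by_type activities activity_name) := by unfold Pre_count_activities_by_type; infer_instance
def pvWitness_count_activities_by_type : (List (List (String × String))) × String :=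
  ([[("activity", "run"), ("type", "Wet BM")], [("activity", "swim"), ("type", "dry")]], "run")

def Spec_count_activities_by_type (activities : List (List (String × String))) (activity_name : String) (out : List (String × Int)) : Prop := out = count_activities_by_type_alt activities activity_name
instance (activities : List (List (String × String))) (activity_name : String) (out : List (String × Int)) : Decidable (Spec_count_activities_by_type activities activity_name out) := by unfold Spec_count_activities_by_type; infer_instance

-- ===== CLAIM (what is proved, stated in full; the proofs are below) =====
def Claim_equal_count_activities_by_type : Prop := ∀ (activities : List (List (String × String))) (activity_name : String), Dom_count_activities_by_type activities activity_name → Pre_count_activities_by_type activities activity_name → Spec_count_activities_by_type activities activity_name (count_activities_by_type activities activity_name)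

-- ===== LEMMAS AND PROOFS =====

-- the lowercased type string of an activity, as both ports compute it
def pvTyp (a : List (String × String)) : String :=
  PySem.Str.lower (((PySem.Dict.ofList a).get? "type").getD "")

-- B's per-key sum over an items list
def pvS (k : String) (l : List (String × Int)) : Int :=
  ((l.filter (fun p => PySem.Str.isIn k p.1)).map Prod.snd).sum

-- one iteration of A's loop body on the three-key counts dict
theorem pvStepA (a : List (String × String)) (w x y : Int) :
    (fun (d : PySem.Dict String Int) (a : List (String × String)) =>
      let t := PySem.Str.lower (((PySem.Dict.ofList a).get? "type").getD "")
      let d1 := if PySem.Str.isIn "wet" t then d.insert "wet" (d.getD "wet" 0 + 1) else d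
      let d2 := if PySem.Str.isIn "dry" t then d1.insert "dry" (d1.getD "dry" 0 + 1) else d1
      if PySem.Str.isIn "bm" t then d2.insert "bm" (d2.getD "bm" 0 + 1) else d2)
      (PySem.Dict.ofList [("wet", w), ("dry", x), ("bm", y)]) a
    = PySem.Dict.ofList [("wet", w + if PySem.Str.isIn "wet" (pvTyp a) then 1 else 0),
                         ("dry", x + if PySem.Str.isIn "dry" (pvTyp a) then 1 else 0),
                         ("bm", y + if PySem.Str.isIn "bm" (pvTyp a) then 1 else 0)] := by
  dsimp only
  generalize hT : PySem.Str.lower (((PySem.Dict.ofList a).get? "type").getD "") = t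
  simp only [pvTyp, hT]
  by_cases hw : PySem.Str.isIn "wet" t = true <;>
    by_cases hd : PySem.Str.isIn "dry" t = true <;>
      by_cases hb : PySem.Str.isIn "bm" t = true <;>
        simp at hw hd hb <;>
        simp [hw, hd, hb, PySem.Dict.ofList, PySem.Dict.update, PySem.Dict.insert,
          PySem.Dict.empty, PySem.Dict.contains, PySem.Dict.getD, PySem.Dict.get?]

-- A's loop over any list, started from the three-key dict, counts the three substrings
theorem pvLoopA (l : List (List (String × String))) (w x y : Int) :
    (l.foldl (fun (d : PySem.Dict String Int) (a : List (String × String)) =>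
      let t := PySem.Str.lower (((PySem.Dict.ofList a).get? "type").getD "")
      let d1 := if PySem.Str.isIn "wet" t then d.insert "wet" (d.getD "wet" 0 + 1) else d
      let d2 := if PySem.Str.isIn "dry" t then d1.insert "dry" (d1.getD "dry" 0 + 1) else d1
      if PySem.Str.isIn "bm" t then d2.insert "bm" (d2.getD "bm" 0 + 1) else d2)
      (PySem.Dict.ofList [("wet", w), ("dry", x), ("bm", y)])).items
    = [("wet", w + (l.countP (fun a => PySem.Str.isIn "wet" (pvTyp a)) : Int)),
       ("dry", x + (l.countP (fun a => PySem.Str.isIn "dry" (pvTyp a)) : Int)),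
       ("bm", y + (l.countP (fun a => PySem.Str.isIn "bm" (pvTyp a)) : Int))] := by
  induction l generalizing w x y with
  | nil =>
    simp [List.countP, PySem.Dict.ofList, PySem.Dict.update, PySem.Dict.insert,
      PySem.Dict.empty, PySem.Dict.contains]
  | cons a l ih =>
    rw [List.foldl_cons]
    have h := pvStepA a w x y
    dsimp only at h ⊢
    rw [h, ih]
    simp only [List.countP_cons, List.cons.injEq, Prod.mk.injEq, and_true, true_and]
    refine ⟨?_, ?_, ?_⟩ <;> (split_ifs <;> push_cast <;> ring)

-- B's conditional frequency loop is the plain counter loop over the matched, lowercased types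
theorem pvFoldFilter (name : String) :
    ∀ (l : List (List (String × String))) (d : PySem.Dict String Int),
    l.foldl (fun d a =>
      if (PySem.Dict.ofList a).get? "activity" == some name then
        let t := PySem.Str.lower (((PySem.Dict.ofList a).get? "type").getD "")
        d.insert t (d.getD t 0 + 1)
      else d) d
    = ((l.filter (fun a => (PySem.Dict.ofList a).get? "activity" == some name)).map pvTyp).foldl
        (fun d t => d.insert t (d.getD t 0 + 1)) d := by
  intro l
  induction l with
  | nil => intro d; rfl
  | cons a l ih =>
    intro d
    simp only [List.foldl_cons, List.filter_cons]
    by_cases h : ((PySem.Dict.ofList a).get? "activity" == some name) = true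
    · rw [if_pos h, if_pos h]
      simp only [List.map_cons, List.foldl_cons, pvTyp]
      exact ih _
    · rw [if_neg h, if_neg h]
      exact ih _

-- the per-key sum over a cons
theorem pvS_cons (k : String) (p : String × Int) (l : List (String × Int)) :
    pvS k (p :: l) = (if PySem.Str.isIn k p.1 then p.2 else 0) + pvS k l := by
  by_cases h : PySem.Chars.isIn k.toList p.1.toList = true <;> simp [pvS, h]

-- replacing the (unique) entry at key t by its successor adds 1 to the sum when k ∈ t
theorem pvS_replace (k t : String) :
    ∀ (l : List (String × Int)), (l.map Prod.fst).Nodup → ∀ w, (t, w) ∈ l →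
    pvS k (l.map (fun p => if p.1 == t then (t, w + 1) else p))
      = pvS k l + (if PySem.Str.isIn k t then 1 else 0) := by
  intro l
  induction l with
  | nil => intro _ w hw; simp at hw
  | cons p l ih =>
    intro hnd w hw
    simp only [List.map_cons, List.nodup_cons] at hnd
    rcases List.mem_cons.mp hw with hw | hw
    · subst hw
      have hrest : ∀ q ∈ l, (q.1 == t) = false := by
        intro q hq
        simp only [beq_eq_false_iff_ne]
        intro hqt
        have hmem : q.1 ∈ l.map Prod.fst := List.mem_map_of_mem hq
        exact hnd.1 (hqt ▸ hmem)
      have hmap : l.map (fun p => if p.1 == t then (t, w + 1) else p) = l := by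
        have : l.map (fun p => if p.1 == t then (t, w + 1) else p) = l.map id :=
          List.map_congr_left (by intro q hq; simp [hrest q hq])
        simpa using this
      simp only [List.map_cons, beq_self_eq_true, if_true, hmap, pvS_cons]
      split_ifs <;> ring
    · have ht : t ∈ l.map Prod.fst := by
        have := List.mem_map_of_mem (f := Prod.fst) hw
        simpa using this
      have hpt : (p.1 == t) = false := by
        simp only [beq_eq_false_iff_ne]
        intro hqt
        exact hnd.1 (hqt ▸ ht)
      simp only [List.map_cons, hpt, Bool.false_eq_true, if_false, pvS_cons,
        ih hnd.2 w hw]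
      ring

-- one counter insertion changes the per-key sum by 1 exactly when k is in the type string
theorem pvS_insert (k t : String) (d : PySem.Dict String Int) (hnd : d.keys.Nodup) :
    pvS k (d.insert t (d.getD t 0 + 1)).items
      = pvS k d.items + (if PySem.Str.isIn k t then 1 else 0) := by
  by_cases hc : d.contains t = true
  · obtain ⟨w, hw⟩ : ∃ w, d.get? t = some w := by
      have := PySem.Dict.contains_eq_isSome_get? d t
      rw [hc] at this
      exact Option.isSome_iff_exists.mp this.symm
    have hmem : (t, w) ∈ d.items := PySem.Dict.mem_items_of_get?_eq_some d hw
    have hgd : d.getD t 0 = w := PySem.Dict.getD_of_get?_eq_some d 0 hw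
    rw [PySem.Dict.items_insert_of_contains d _ hc, hgd]
    exact pvS_replace k t d.items hnd w hmem
  · rw [PySem.Dict.items_insert_of_not_contains d _ (by simpa using hc),
      PySem.Dict.getD_of_not_contains d _ (by simpa using hc)]
    by_cases hk : PySem.Chars.isIn k.toList t.toList = true <;>
      simp [pvS, List.filter_append, hk]

-- the counter loop's per-key sum counts the substring occurrences in the fed list
theorem pvSumLoop (k : String) :
    ∀ (ts : List String) (d : PySem.Dict String Int), d.keys.Nodup →
    pvS k (ts.foldl (fun d t => d.insert t (d.getD t 0 + 1)) d).items
      = pvS k d.items + (ts.countP (fun t => PySem.Str.isIn k t) : Int) := by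
  intro ts
  induction ts with
  | nil => intro d _; simp [List.countP]
  | cons t ts ih =>
    intro d hnd
    rw [List.foldl_cons, ih _ (PySem.Dict.nodup_keys_insert d t _ hnd), pvS_insert k t d hnd,
      List.countP_cons]
    split_ifs <;> push_cast <;> ring

-- ===== VERDICT (by name: the statement is the Claim_ definition above) =====
theorem count_activities_by_type_spec : Claim_equal_count_activities_by_type := by
  intro activities activity_name _ _
  unfold Spec_count_activities_by_type count_activities_by_type count_activities_by_type_alt
  rw [pvLoopA, pvFoldFilter]
  have hnd : (PySem.Dict.empty : PySem.Dict String Int).keys.Nodup := PySem.Dict.nodup_keys_empty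
  simp only [List.map_cons, List.map_nil]
  have hk : ∀ (k : String),
      pvS k (((activities.filter (fun a => (PySem.Dict.ofList a).get? "activity" == some activity_name)).map pvTyp).foldl
        (fun d t => d.insert t (d.getD t 0 + 1)) PySem.Dict.empty).items
      = ((activities.filter (fun a => (PySem.Dict.ofList a).get? "activity" == some activity_name)).countP
          (fun a => PySem.Str.isIn k (pvTyp a)) : Int) := by
    intro k
    rw [pvSumLoop k _ _ hnd, List.countP_map]
    simp [pvS, PySem.Dict.empty, Function.comp_def]
  simp only [pvS] at hk
  rw [hk "wet", hk "dry", hk "bm"]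
  simp
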